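-- pv_equiv track=rewrite | github.com/krglkvrmn/BI_2021_spring_project | describe_substitutions.py | is_single
-- ===== SOURCE A (Python) =====
-- def is_single(seq: str, position: int) -> bool:
--     """Check if proline at given position is single by seeking adjacent prolines on the left and on the right"""
--     if position == 0:
--         directions = (1,)
--     elif position == len(seq) - 1:
--         directions = (-1,)
--     else:
--         directions = (-1, 1)
--     for direction in directions:
--         pos = position + direction
--         while pos != -1 and pos != len(seq):
--             if seq[pos] == "-":
--                 pos += direction
--             elif seq[pos] == "P":
--                 return False
--             else:
--                 break
--     return True
-- ===== SOURCE B (Python) =====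
-- def is_single(seq: str, position: int) -> bool:
--     """Check if proline at given position is single by seeking adjacent prolines on the left and on the right"""
--     _ = seq[position]  # the position must address a residue (IndexError otherwise)
--     left = seq[:position].rstrip('-')
--     right = seq[position + 1:].lstrip('-')
--     return not ((left and left[-1] == 'P') or (right and right[0] == 'P'))
-- ===== Notes on version B (the rewrite author's own statement) =====
-- stated objective: simpler
-- what changed: Replaced the directional while-loops and the three-way edge-case branching on position with two slices stripped of dashes: the nearest non-dash neighbours are left[-1] and right[0], empty slices covering the boundaries automatically.
-- intended difference: For positions ≤ -2 counted from the end (Python negative indices) where every character to the right of the addressed one is '-' except a final 'P', A's rightward walk stops at index -1 and never inspects that last character, returning True, while B returns False — intended, since the nearest non-dash right neighbour IS a proline. — e.g. on is_single("A-P", -2): A returns true, B returns false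
-- outside the precondition, e.g. on is_single('P--', 3): A returns False, B raises IndexError
-- crash fix: A raises IndexError when position is past either end of seq or is a negative index whose entire left context is dashes (its leftward walk runs past -len), except position == len(seq) with the dash-stripped sequence ending in 'P'; B returns the adjacency answer of the clamped slices there. — e.g. on is_single("--", -1): A raises IndexError, B returns true
import Mathlib
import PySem

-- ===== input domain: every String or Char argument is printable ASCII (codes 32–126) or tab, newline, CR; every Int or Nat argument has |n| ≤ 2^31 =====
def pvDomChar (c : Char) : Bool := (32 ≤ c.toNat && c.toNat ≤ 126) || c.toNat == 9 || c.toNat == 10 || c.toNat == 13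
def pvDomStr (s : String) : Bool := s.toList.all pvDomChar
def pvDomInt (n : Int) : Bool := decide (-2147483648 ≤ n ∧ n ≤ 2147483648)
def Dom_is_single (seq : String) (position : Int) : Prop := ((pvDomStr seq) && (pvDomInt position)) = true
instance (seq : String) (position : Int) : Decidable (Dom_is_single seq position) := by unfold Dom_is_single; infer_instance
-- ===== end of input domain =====

-- B replaces A's directional while-loops and edge-case branching by slicing + dash-stripping; objective: simpler.


-- ===== PORT A =====
-- A's inner while-loop, one direction; fuel bounds the iteration count (inside Pre_ the loop
-- visits at most chars.length positions, so fuel = chars.length + 1 never runs out).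
-- `pyGet? = none` is exactly where Python's seq[pos] would raise IndexError (outside Pre_).
def pvWalk (chars : List Char) (direction : Int) : Nat → Int → Bool
  | 0, _ => false
  | fuel + 1, pos =>
    if pos = -1 ∨ pos = (chars.length : Int) then false
    else
      match PySem.List.pyGet? chars pos with
      | none => false
      | some c =>
        if c = '-' then pvWalk chars direction fuel (pos + direction)
        else decide (c = 'P')          -- 'P' → early return False in A; other char → break

def is_single (seq : String) (position : Int) : Bool :=
  let chars := seq.toList
  let directions : List Int :=
    if position = 0 then [1]
    else if position = (chars.length : Int) - 1 then [-1]
    else [-1, 1]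
  -- A's early `return False` on finding a 'P' is the `any` over directions
  !(directions.any (fun d => pvWalk chars d (chars.length + 1) (position + d)))

-- ===== PORT B =====
-- hand ports of str.rstrip('-') / str.lstrip('-') (exact: the strip set is the single char '-')
def pvRstripDash (cs : List Char) : List Char := (cs.reverse.dropWhile (· == '-')).reverse
def pvLstripDash (cs : List Char) : List Char := cs.dropWhile (· == '-')

def is_single_alt (seq : String) (position : Int) : Bool :=
  let cs := seq.toList
  match PySem.List.pyGet? cs position with
  | none => false          -- Python B raises IndexError here (outside Pre_; see Raises_/Pre_)
  | some _ =>
    let left := pvRstripDash (PySem.List.slice cs none (some position))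
    let right := pvLstripDash (PySem.List.slice cs (some (position + 1)) none)
    !((left.getLast? == some 'P') || (right.head? == some 'P'))

-- ===== PRECONDITION & SPEC =====
-- Pre_ admits every input on which Python A returns normally except position ≥ len(seq) (there A
-- returns only in the rare case position = len(seq) with the dash-stripped string ending in 'P',
-- where it agrees with B anyway — see the cite): for 0 ≤ position < len A indexes normally, and for
-- -len ≤ position < 0 A returns iff some character left of the addressed one is not '-' (otherwise
-- its leftward walk runs past index -len and raises IndexError).
def Pre_is_single (seq : String) (position : Int) : Prop :=
  (0 ≤ position ∧ position < (seq.toList.length : Int)) ∨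
  (-(seq.toList.length : Int) ≤ position ∧ position < 0 ∧
    (seq.toList.take ((position + seq.toList.length).toNat)).any (fun c => !(c == '-')) = true)
instance (seq : String) (position : Int) : Decidable (Pre_is_single seq position) := by
  unfold Pre_is_single; infer_instance

def pvWitness_is_single : String × Int := ("P-AP", 0)

-- Intended difference: for negative positions ≤ -2 whose rightward context is all dashes up to a
-- final 'P' (and whose nearest non-dash left neighbour, if any, is not a proline), A's rightward
-- walk stops at index -1 and never sees that last character, returning True, while B returns False
-- because the nearest non-dash right neighbour of seq[position] IS that proline — the intended answer.
def D_is_single (seq : String) (position : Int) : Prop :=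
  let m := (position + seq.toList.length).toNat
  position ≤ -2 ∧ (seq.toList.drop (m + 1)).dropWhile (· == '-') = ['P'] ∧
  (PySem.Chars.stripChars (seq.toList.take m) ['-']).getLast? ≠ some 'P'
instance (seq : String) (position : Int) : Decidable (D_is_single seq position) := by
  unfold D_is_single; infer_instance

-- On a valid negative index whose whole left context is dashes, A's leftward walk runs past index
-- -len and raises IndexError, while B (whose bounds check seq[position] succeeds) returns the
-- adjacency answer of the slices.
def Raises_is_single (seq : String) (position : Int) : Prop :=
  -(seq.toList.length : Int) ≤ position ∧ position < 0 ∧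
  (seq.toList.take ((position + seq.toList.length).toNat)).all (· == '-') = true
instance (seq : String) (position : Int) : Decidable (Raises_is_single seq position) := by
  unfold Raises_is_single; infer_instance

def pvRaiseWitness_is_single : String × Int := ("--", -1)
def pvRaiseWitnessOut_is_single : Bool := true

def Spec_is_single (seq : String) (position : Int) (out : Bool) : Prop := ¬ D_is_single seq position → out = is_single_alt seq position
instance (seq : String) (position : Int) (out : Bool) : Decidable (Spec_is_single seq position out) := by unfold Spec_is_single; infer_instance

def pvDiffWitness_is_single : String × Int := ("A-P", -2)
def pvDiffWitnessOut_is_single : Bool × Bool := (true, false)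

-- ===== CLAIM (what is proved, stated in full; the proofs are below) =====
def Claim_unchanged_is_single : Prop := ∀ (seq : String) (position : Int), Dom_is_single seq position → Pre_is_single seq position → Spec_is_single seq position (is_single seq position)
def Claim_raises_is_single : Prop := (∀ (seq : String) (position : Int), Dom_is_single seq position → Raises_is_single seq position → ¬ Pre_is_single seq position) ∧ (Dom_is_single (pvRaiseWitness_is_single.1) (pvRaiseWitness_is_single.2) ∧ Raises_is_single (pvRaiseWitness_is_single.1) (pvRaiseWitness_is_single.2) ∧ is_single_alt (pvRaiseWitness_is_single.1) (pvRaiseWitness_is_single.2) = pvRaiseWitnessOut_is_single)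
def Claim_changed_is_single : Prop := Dom_is_single (pvDiffWitness_is_single.1) (pvDiffWitness_is_single.2) ∧ Pre_is_single (pvDiffWitness_is_single.1) (pvDiffWitness_is_single.2) ∧ D_is_single (pvDiffWitness_is_single.1) (pvDiffWitness_is_single.2) ∧ is_single (pvDiffWitness_is_single.1) (pvDiffWitness_is_single.2) = pvDiffWitnessOut_is_single.1 ∧ is_single_alt (pvDiffWitness_is_single.1) (pvDiffWitness_is_single.2) = pvDiffWitnessOut_is_single.2 ∧ pvDiffWitnessOut_is_single.1 ≠ pvDiffWitnessOut_is_single.2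
def Claim_exact_is_single : Prop := ∀ (seq : String) (position : Int), Dom_is_single seq position → Pre_is_single seq position → D_is_single seq position → is_single seq position ≠ is_single_alt seq position

-- ===== LEMMAS AND PROOFS =====

-- A's left walk from position k-1 (k ≥ 0 a valid index bound) finds a 'P' iff the dash-stripped
-- reversed prefix of length k starts with 'P'
theorem pvWalk_left (cs : List Char) (k : Nat) (hk : k ≤ cs.length) :
    ∀ fuel, k + 1 ≤ fuel →
      pvWalk cs (-1) fuel ((k : Int) - 1)
        = (((cs.take k).reverse.dropWhile (· == '-')).head? == some 'P') := by
  induction k with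
  | zero =>
    intro fuel hf
    obtain ⟨f, rfl⟩ : ∃ f, fuel = f + 1 := ⟨fuel - 1, by omega⟩
    simp [pvWalk]
  | succ k ih =>
    intro fuel hf
    obtain ⟨f, rfl⟩ : ∃ f, fuel = f + 1 := ⟨fuel - 1, by omega⟩
    have hklt : k < cs.length := by omega
    have hpos : ((k : Int) + 1) - 1 = (k : Int) := by ring
    have hget : PySem.List.pyGet? cs (k : Int) = some cs[k] := by
      rw [PySem.List.pyGet?_natCast]; simp [hklt]
    have htake : (cs.take (k + 1)).reverse = cs[k] :: (cs.take k).reverse := by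
      rw [List.take_add_one]; simp [hklt]
    simp only [pvWalk, Nat.cast_add, Nat.cast_one, hpos, hget]
    have hne1 : ¬((k : Int) = -1 ∨ (k : Int) = (cs.length : Int)) := by omega
    rw [if_neg hne1, htake]
    by_cases hc : cs[k] = '-'
    · have : (k : Int) + -1 = (k : Int) - 1 := by ring
      rw [if_pos hc, this, ih (by omega) f (by omega)]
      simp [List.dropWhile, hc]
    · rw [if_neg hc]
      have hb : (cs[k] == '-') = false := by simp [hc]
      by_cases hP : cs[k] = 'P' <;> simp [List.dropWhile, hb, hP]

-- A's right walk from a non-negative position k finds a 'P' iff the dash-stripped suffix starts with 'P'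
theorem pvWalk_right (cs : List Char) :
    ∀ fuel k, k ≤ cs.length → cs.length - k + 1 ≤ fuel →
      pvWalk cs 1 fuel (k : Int)
        = (((cs.drop k).dropWhile (· == '-')).head? == some 'P') := by
  intro fuel
  induction fuel with
  | zero => intro k hk hf; omega
  | succ f ih =>
    intro k hk hf
    by_cases hkl : k = cs.length
    · subst hkl; simp [pvWalk]
    · have hklt : k < cs.length := by omega
      have hget : PySem.List.pyGet? cs (k : Int) = some cs[k] := by
        rw [PySem.List.pyGet?_natCast]; simp [hklt]
      have hne1 : ¬((k : Int) = -1 ∨ (k : Int) = (cs.length : Int)) := by omega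
      simp only [pvWalk, hget]
      rw [if_neg hne1, List.drop_eq_getElem_cons hklt]
      by_cases hc : cs[k] = '-'
      · have : (k : Int) + 1 = ((k + 1 : Nat) : Int) := by push_cast; ring
        rw [if_pos hc, this, ih (k + 1) (by omega) (by omega)]
        simp [List.dropWhile, hc]
      · rw [if_neg hc]
        have hb : (cs[k] == '-') = false := by simp [hc]
        by_cases hP : cs[k] = 'P' <;> simp [List.dropWhile, hb, hP, List.getElem?_eq_getElem hklt]

-- a prefix with a non-dash character survives dash-stripping
theorem pvStripNeNil (l : List Char) (h : l.any (fun c => !(c == '-')) = true) :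
    l.reverse.dropWhile (· == '-') ≠ [] := by
  rw [Ne, List.dropWhile_eq_nil_iff]
  rw [List.any_eq_true] at h
  obtain ⟨x, hx, hxd⟩ := h
  intro hall
  have := hall x (by simpa using hx)
  simp at hxd this
  exact hxd this

-- A's left walk started at a NEGATIVE python index (prefix of length m to its left, containing a
-- non-dash so the walk terminates) computes the same dash-stripped-prefix test
theorem pvWalk_left_neg (cs : List Char) (m : Nat) (hm : m < cs.length)
    (hex : (cs.take m).reverse.dropWhile (· == '-') ≠ []) :
    ∀ fuel, m ≤ fuel →
      pvWalk cs (-1) fuel ((m : Int) - cs.length - 1)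
        = (((cs.take m).reverse.dropWhile (· == '-')).head? == some 'P') := by
  induction m with
  | zero => simp at hex
  | succ m ih =>
    intro fuel hf
    obtain ⟨f, rfl⟩ : ∃ f, fuel = f + 1 := ⟨fuel - 1, by omega⟩
    have hmlt : m < cs.length := by omega
    have hpos : ((m + 1 : Nat) : Int) - cs.length - 1 = -(((cs.length - m : Nat)) : Int) := by
      push_cast [Nat.cast_sub (le_of_lt hmlt)]; ring
    have hget : PySem.List.pyGet? cs (-(((cs.length - m : Nat)) : Int)) = some cs[m] := by
      rw [PySem.List.pyGet?_neg_natCast cs (cs.length - m) (by omega) (by omega)]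
      have : cs.length - (cs.length - m) = m := by omega
      rw [this]; simp [hmlt]
    have htake : (cs.take (m + 1)).reverse = cs[m] :: (cs.take m).reverse := by
      rw [List.take_add_one]; simp [hmlt]
    have hne1 : ¬(-(((cs.length - m : Nat)) : Int) = -1 ∨ -(((cs.length - m : Nat)) : Int) = (cs.length : Int)) := by omega
    simp only [pvWalk, hpos, hget]
    rw [if_neg hne1, htake]
    by_cases hc : cs[m] = '-'
    · have hrec : -(((cs.length - m : Nat)) : Int) + -1 = (m : Int) - cs.length - 1 := by
        push_cast [Nat.cast_sub (le_of_lt hmlt)]; ring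
      have hex' : (cs.take m).reverse.dropWhile (· == '-') ≠ [] := by
        rw [htake] at hex
        simpa [List.dropWhile, hc] using hex
      rw [if_pos hc, hrec, ih hmlt hex' f (by omega)]
      simp [List.dropWhile, hc]
    · rw [if_neg hc]
      have hb : (cs[m] == '-') = false := by simp [hc]
      by_cases hP : cs[m] = 'P' <;> simp [List.dropWhile, hb, hP]

-- A's right walk started at NEGATIVE python index -k stops at index -1 and therefore never sees the
-- LAST character: it tests the dash-stripped suffix WITHOUT its last element
theorem pvWalk_right_neg (cs : List Char) :
    ∀ (k : Nat), 1 ≤ k → k ≤ cs.length → ∀ fuel, k ≤ fuel →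
      pvWalk cs 1 fuel (-(k : Int))
        = (((cs.drop (cs.length - k)).dropLast.dropWhile (· == '-')).head? == some 'P') := by
  intro k
  induction k with
  | zero => omega
  | succ k ih =>
    intro _ hkn fuel hf
    obtain ⟨f, rfl⟩ : ∃ f, fuel = f + 1 := ⟨fuel - 1, by omega⟩
    by_cases hk0 : k = 0
    · subst hk0
      have hlast : (cs.drop (cs.length - 1)).dropLast = [] := by
        rw [List.dropLast_eq_take]
        have : (cs.drop (cs.length - 1)).length = 1 := by simp; omega
        rw [this]
        simp
      simp [pvWalk, hlast]
    · have hne1 : ¬(-((k + 1 : Nat) : Int) = -1 ∨ -((k + 1 : Nat) : Int) = (cs.length : Int)) := by omega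
      have hidx : cs.length - (k + 1) < cs.length := by omega
      have hget : PySem.List.pyGet? cs (-((k + 1 : Nat) : Int)) = some cs[cs.length - (k + 1)] := by
        rw [PySem.List.pyGet?_neg_natCast cs (k + 1) (by omega) (by omega)]
        simp [hidx]
      have hdrop : cs.drop (cs.length - (k + 1)) = cs[cs.length - (k + 1)] :: cs.drop (cs.length - k) := by
        have e : cs.length - k = cs.length - (k + 1) + 1 := by omega
        rw [e]
        exact List.drop_eq_getElem_cons hidx
      have htailne : cs.drop (cs.length - k) ≠ [] := by
        have hlen : (cs.drop (cs.length - k)).length = k := by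
          rw [List.length_drop]; omega
        intro h; rw [h] at hlen; simp at hlen; omega
      have hdl : (cs.drop (cs.length - (k + 1))).dropLast
          = cs[cs.length - (k + 1)] :: (cs.drop (cs.length - k)).dropLast := by
        rw [hdrop, List.dropLast_cons_of_ne_nil htailne]
      simp only [pvWalk, hget]
      rw [if_neg hne1, hdl]
      by_cases hc : cs[cs.length - (k + 1)] = '-'
      · have hrec : -((k + 1 : Nat) : Int) + 1 = -(k : Int) := by push_cast; ring
        rw [if_pos hc, hrec, ih (by omega) (by omega) f (by omega)]
        simp [List.dropWhile, hc]
      · rw [if_neg hc]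
        have hb : (cs[cs.length - (k + 1)] == '-') = false := by simp [hc]
        by_cases hP : cs[cs.length - (k + 1)] = 'P' <;> simp [List.dropWhile, hb, hP]

-- characterisation of PORT A at a negative position ≤ -2 (with a terminating left walk):
-- left test on the prefix, right test on the suffix WITHOUT its last character
theorem pvA_neg2 (seq : String) (position : Int) (m : Nat)
    (hm : position = (m : Int) - seq.toList.length) (hmlt : m + 1 < seq.toList.length)
    (hex : (seq.toList.take m).reverse.dropWhile (· == '-') ≠ []) :
    is_single seq position
      = !((((seq.toList.take m).reverse.dropWhile (· == '-')).head? == some 'P')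
          || (((seq.toList.drop (m + 1)).dropLast.dropWhile (· == '-')).head? == some 'P')) := by
  simp only [is_single]
  set cs := seq.toList with hcs
  have hn : m + 1 < cs.length := hmlt
  have hp0 : position ≠ 0 := by omega
  have hpn : position ≠ (cs.length : Int) - 1 := by omega
  rw [if_neg hp0, if_neg hpn]
  have hL : pvWalk cs (-1) (cs.length + 1) (position + -1)
      = (((cs.take m).reverse.dropWhile (· == '-')).head? == some 'P') := by
    have e : position + -1 = (m : Int) - cs.length - 1 := by omega
    rw [e, pvWalk_left_neg cs m (by omega) hex (cs.length + 1) (by omega)]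
  have hR : pvWalk cs 1 (cs.length + 1) (position + 1)
      = (((cs.drop (m + 1)).dropLast.dropWhile (· == '-')).head? == some 'P') := by
    have e : position + 1 = -(((cs.length - (m + 1) : Nat)) : Int) := by
      push_cast [Nat.cast_sub (le_of_lt hn)]; omega
    have e2 : cs.length - (cs.length - (m + 1)) = m + 1 := by omega
    rw [e, pvWalk_right_neg cs (cs.length - (m + 1)) (by omega) (by omega) (cs.length + 1) (by omega), e2]
  simp [hL, hR]

-- characterisation of PORT B at the same positions: right test on the FULL suffix
theorem pvB_neg2 (seq : String) (position : Int) (m : Nat)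
    (hm : position = (m : Int) - seq.toList.length) (hmlt : m + 1 < seq.toList.length) :
    is_single_alt seq position
      = !((((seq.toList.take m).reverse.dropWhile (· == '-')).head? == some 'P')
          || (((seq.toList.drop (m + 1)).dropWhile (· == '-')).head? == some 'P')) := by
  simp only [is_single_alt]
  set cs := seq.toList with hcs
  have hget : PySem.List.pyGet? cs position = some cs[m] := by
    have e : position = -(((cs.length - m : Nat)) : Int) := by
      push_cast [Nat.cast_sub (by omega : m ≤ cs.length)]; omega
    rw [e, PySem.List.pyGet?_neg_natCast cs (cs.length - m) (by omega) (by omega)]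
    have e2 : cs.length - (cs.length - m) = m := by omega
    rw [e2, List.getElem?_eq_getElem (by omega)]
  rw [hget]
  have hsl : PySem.List.slice cs none (some position) = cs.take m := by
    have e : position = -(((cs.length - m : Nat)) : Int) := by
      push_cast [Nat.cast_sub (by omega : m ≤ cs.length)]; omega
    rw [e, PySem.List.slice_to_neg_natCast cs (cs.length - m) (by omega)]
    congr 1
    omega
  have hsr : PySem.List.slice cs (some (position + 1)) none = cs.drop (m + 1) := by
    have e : position + 1 = -(((cs.length - (m + 1) : Nat)) : Int) := by
      push_cast [Nat.cast_sub (le_of_lt hmlt)]; omega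
    rw [e, PySem.List.slice_from_neg_natCast cs (cs.length - (m + 1)) (by omega)]
    congr 1
    omega
  simp only [hsl, hsr, pvRstripDash, pvLstripDash]
  rw [List.getLast?_reverse]

-- the two right tests agree unless everything strictly between the addressed position and the last
-- character is a dash and the last character is 'P'
theorem pvTailTest (X : List Char) (hne : X ≠ [])
    (h : ¬(X.dropLast.all (· == '-') = true ∧ X.getLast? = some 'P')) :
    ((X.dropLast.dropWhile (· == '-')).head? == some 'P')
      = ((X.dropWhile (· == '-')).head? == some 'P') := by
  obtain ⟨Y, l, rfl⟩ : ∃ Y l, X = Y ++ [l] :=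
    ⟨X.dropLast, X.getLast hne, by rw [List.dropLast_append_getLast hne]⟩
  rw [List.dropLast_concat] at h ⊢
  rw [List.dropWhile_append]
  rcases hY : Y.dropWhile (· == '-') with _ | ⟨c, t⟩
  · have hall : Y.all (· == '-') = true := by
      rw [List.all_eq_true]
      exact fun x hx => (List.dropWhile_eq_nil_iff.mp hY) x hx
    have hlast : (Y ++ [l]).getLast? = some l := by simp
    have hlP : l ≠ 'P' := by
      intro hl; exact h ⟨hall, by rw [hlast, hl]⟩
    have hlP' : (l == 'P') = false := by simp [hlP]
    by_cases hld : l = '-'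
    · simp [List.dropWhile, hld]
    · have hld2 : (l == '-') = false := by simp [hld]
      simp [List.dropWhile, hld2, hlP']
  · simp

-- str.strip('-') does not change the LAST non-dash character: the getLast? of the both-ends strip
-- is the head of the dash-stripped reversal
theorem pvStripCharsLast (s : List Char) :
    (PySem.Chars.stripChars s ['-']).getLast? = (s.reverse.dropWhile (· == '-')).head? := by
  unfold PySem.Chars.stripChars
  rw [List.getLast?_reverse]
  have hp : (fun c => List.contains ['-'] c) = (fun c => c == '-') := by
    funext c
    by_cases h : c = '-' <;> simp [List.contains_eq_mem, h]
  rw [hp]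
  induction s with
  | nil => simp
  | cons c t ih =>
    by_cases hc : (c == '-') = true
    · rw [List.dropWhile_cons]
      simp only [hc, if_true, ih]
      rw [List.reverse_cons, List.dropWhile_append]
      rcases hT : t.reverse.dropWhile (· == '-') with _ | ⟨d, u⟩
      · simp [hc]
      · simp
    · have hc2 : (c == '-') = false := by simpa using hc
      rw [List.dropWhile_cons]
      simp [hc2]

-- a nonempty suffix dash-strips to exactly ['P'] iff everything but its last char is a dash and
-- its last char is 'P'
theorem pvStripSpec (X : List Char) (hne : X ≠ []) :
    (X.dropWhile (· == '-') = ['P'])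
      ↔ (X.dropLast.all (· == '-') = true ∧ X.getLast? = some 'P') := by
  obtain ⟨Y, l, rfl⟩ : ∃ Y l, X = Y ++ [l] :=
    ⟨X.dropLast, X.getLast hne, by rw [List.dropLast_append_getLast hne]⟩
  rw [List.dropLast_concat, List.dropWhile_append]
  rcases hY : Y.dropWhile (· == '-') with _ | ⟨c, t⟩
  · have hall : Y.all (· == '-') = true := by
      rw [List.all_eq_true]
      exact fun x hx => (List.dropWhile_eq_nil_iff.mp hY) x hx
    by_cases hld : l = '-'
    · simp [List.dropWhile, hld, hall]
    · have hld2 : (l == '-') = false := by simp [hld]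
      simp [List.dropWhile, hld2, hall]
  · have hnall : ¬(Y.all (· == '-') = true) := by
      intro hall
      have : Y.dropWhile (· == '-') = [] := by
        rw [List.dropWhile_eq_nil_iff]
        exact fun x hx => (List.all_eq_true.mp hall) x hx
      rw [hY] at this; simp at this
    simp [hnall]

-- ===== VERDICT (by name: the statement is the Claim_ definition above) =====
theorem is_single_spec : Claim_unchanged_is_single := by
  intro seq position _ hpre hnd
  rcases hpre with ⟨h0, hlt⟩ | ⟨hge, hneg, hany⟩
  · -- 0 ≤ position < len: both programs test the dash-stripped prefix and suffix around position
    simp only [is_single, is_single_alt]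
    set cs := seq.toList with hcs
    obtain ⟨p, rfl⟩ : ∃ p : Nat, position = (p : Int) := ⟨position.toNat, (Int.toNat_of_nonneg h0).symm⟩
    have hp : p < cs.length := by exact_mod_cast hlt
    have hget : PySem.List.pyGet? cs (p : Int) = some cs[p] := by
      rw [PySem.List.pyGet?_natCast, List.getElem?_eq_getElem hp]
    rw [hget]
    have hsliceL : PySem.List.slice cs none (some (p : Int)) = cs.take p := by
      rw [PySem.List.slice_to cs (by positivity)]; simp
    have hsliceR : PySem.List.slice cs (some ((p : Int) + 1)) none = cs.drop (p + 1) := by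
      have e : ((p : Int) + 1) = ((p + 1 : Nat) : Int) := by push_cast; ring
      rw [e, PySem.List.slice_from cs (by positivity)]
      simp
    have hlast : ∀ l : List Char, (pvRstripDash l).getLast? = (l.reverse.dropWhile (· == '-')).head? := by
      intro l; unfold pvRstripDash; exact List.getLast?_reverse
    simp only [hsliceL, hsliceR, hlast, pvLstripDash]
    have hL : pvWalk cs (-1) (cs.length + 1) ((p : Int) + -1)
        = (((cs.take p).reverse.dropWhile (· == '-')).head? == some 'P') := by
      have e : (p : Int) + -1 = (p : Int) - 1 := by ring
      rw [e, pvWalk_left cs p (by omega) (cs.length + 1) (by omega)]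
    have hR : pvWalk cs 1 (cs.length + 1) ((p : Int) + 1)
        = (((cs.drop (p + 1)).dropWhile (· == '-')).head? == some 'P') := by
      have e : (p : Int) + 1 = ((p + 1 : Nat) : Int) := by push_cast; ring
      rw [e, pvWalk_right cs (cs.length + 1) (p + 1) (by omega) (by omega)]
    by_cases hp0 : (p : Int) = 0
    · have hpz : p = 0 := by exact_mod_cast hp0
      subst hpz
      rw [if_pos hp0]
      simp only [Nat.cast_zero, zero_add] at hR ⊢
      simp [hR]
    · by_cases hpn : (p : Int) = (cs.length : Int) - 1
      · have hpn' : p + 1 = cs.length := by omega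
        rw [if_neg hp0, if_pos hpn]
        simp [hL, hpn']
      · rw [if_neg hp0, if_neg hpn]
        simp [hL, hR]
  · -- negative position: A indexes from the right like B's slices do, except that A's rightward
    -- walk stops at index -1 (the region D_ collects the inputs where that matters)
    set cs := seq.toList with hcs
    have hnpos : 0 < cs.length := by omega
    set m : Nat := (position + cs.length).toNat with hmdef
    have hm : position = (m : Int) - cs.length := by omega
    have hmlt : m < cs.length := by omega
    have hex : (cs.take m).reverse.dropWhile (· == '-') ≠ [] := pvStripNeNil _ hany
    by_cases hp1 : position = -1
    · -- position = -1: A's rightward walk starts at index 0, exactly B's seq[0:] lstrip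
      have hm1 : m = cs.length - 1 := by omega
      simp only [is_single, is_single_alt, ← hcs]
      have hgetB : PySem.List.pyGet? cs position = some cs[m] := by
        have e : position = -(((cs.length - m : Nat)) : Int) := by
          push_cast [Nat.cast_sub (by omega : m ≤ cs.length)]; omega
        rw [e, PySem.List.pyGet?_neg_natCast cs (cs.length - m) (by omega) (by omega)]
        have e2 : cs.length - (cs.length - m) = m := by omega
        rw [e2, List.getElem?_eq_getElem (by omega)]
      rw [hgetB]
      have hp0 : position ≠ 0 := by omega
      have hpn : position ≠ (cs.length : Int) - 1 := by omega
      rw [if_neg hp0, if_neg hpn]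
      have hL : pvWalk cs (-1) (cs.length + 1) (position + -1)
          = (((cs.take m).reverse.dropWhile (· == '-')).head? == some 'P') := by
        have e : position + -1 = (m : Int) - cs.length - 1 := by omega
        rw [e, pvWalk_left_neg cs m hmlt hex (cs.length + 1) (by omega)]
      have hR : pvWalk cs 1 (cs.length + 1) (position + 1)
          = ((cs.dropWhile (· == '-')).head? == some 'P') := by
        have e : position + 1 = ((0 : Nat) : Int) := by omega
        rw [e, pvWalk_right cs (cs.length + 1) 0 (by omega) (by omega)]
        simp
      have hsl : PySem.List.slice cs none (some position) = cs.take m := by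
        rw [hp1, PySem.List.slice_to_neg_one]
        rw [List.dropLast_eq_take, hm1]
      have hsr : PySem.List.slice cs (some (position + 1)) none = cs := by
        have e : position + 1 = (0 : Int) := by omega
        rw [e, PySem.List.slice_zero_start, PySem.List.slice_none_none]
      simp only [hsl, hsr, pvRstripDash, pvLstripDash]
      rw [List.getLast?_reverse]
      simp [hL, hR]
    · -- position ≤ -2
      have hple : m + 1 < cs.length := by omega
      rw [pvA_neg2 seq position m (by rw [← hcs]; exact hm) (by rw [← hcs]; exact hple) (by rw [← hcs]; exact hex),
          pvB_neg2 seq position m (by rw [← hcs]; exact hm) (by rw [← hcs]; exact hple)]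
      rw [← hcs]
      by_cases hLP : (((cs.take m).reverse.dropWhile (· == '-')).head? == some 'P') = true
      · rw [hLP]; simp
      · have hXne : cs.drop (m + 1) ≠ [] := by
          have : (cs.drop (m + 1)).length = cs.length - (m + 1) := by simp
          intro h; rw [h] at this; simp at this; omega
        have hleft : (PySem.Chars.stripChars (cs.take m) ['-']).getLast? ≠ some 'P' := by
          rw [pvStripCharsLast]
          rcases hh : ((cs.take m).reverse.dropWhile (· == '-')).head? with _ | c
          · simp
          · rw [hh] at hLP
            simpa using hLP
        have htail : ¬((cs.drop (m + 1)).dropLast.all (· == '-') = true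
            ∧ (cs.drop (m + 1)).getLast? = some 'P') := by
          intro hcombo
          exact hnd ⟨by omega, (pvStripSpec _ hXne).mpr hcombo, hleft⟩
        rw [pvTailTest (cs.drop (m + 1)) hXne htail]

theorem is_single_changed : Claim_changed_is_single := by
  unfold Claim_changed_is_single; decide

def is_single_raises : Claim_raises_is_single := by
  unfold Claim_raises_is_single
  refine ⟨?_, by decide⟩
  intro seq position _ h
  obtain ⟨hge, hlt, hall⟩ := h
  rintro (⟨g1, g2⟩ | ⟨g1, g2, g3⟩)
  · omega
  · rw [List.any_eq_true] at g3
    obtain ⟨x, hx, hxd⟩ := g3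
    have hx' := (List.all_eq_true.mp hall) x hx
    simp at hxd hx'
    exact hxd hx'

theorem is_single_tight : Claim_exact_is_single := by
  intro seq position _ hpre hd
  obtain ⟨hle2, hstrip, hleftD⟩ := hd
  set cs := seq.toList with hcs
  obtain ⟨hge, hany⟩ : -(cs.length : Int) ≤ position ∧ (cs.take ((position + cs.length).toNat)).any (fun c => !(c == '-')) = true := by
    rcases hpre with ⟨g1, _⟩ | ⟨g1, _, g3⟩
    · omega
    · exact ⟨g1, g3⟩
  have hnpos : 0 < cs.length := by omega
  set m : Nat := (position + cs.length).toNat with hmdef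
  have hm : position = (m : Int) - cs.length := by omega
  have hple : m + 1 < cs.length := by omega
  have hex : (cs.take m).reverse.dropWhile (· == '-') ≠ [] := pvStripNeNil _ hany
  rw [pvStripCharsLast] at hleftD
  rw [pvA_neg2 seq position m (by rw [← hcs]; exact hm) (by rw [← hcs]; exact hple) (by rw [← hcs]; exact hex),
      pvB_neg2 seq position m (by rw [← hcs]; exact hm) (by rw [← hcs]; exact hple)]
  rw [← hcs]
  have hLP : (((cs.take m).reverse.dropWhile (· == '-')).head? == some 'P') = false := by
    rcases hh : ((cs.take m).reverse.dropWhile (· == '-')).head? with _ | c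
    · simp
    · rw [hh] at hleftD
      simp only [ne_eq, Option.some.injEq] at hleftD
      simp [hleftD]
  have hXne : cs.drop (m + 1) ≠ [] := by
    have hlen : (cs.drop (m + 1)).length = cs.length - (m + 1) := by simp
    intro h; rw [h] at hlen; simp at hlen; omega
  obtain ⟨hall, _⟩ := (pvStripSpec _ hXne).mp hstrip
  have hAfalse : ((cs.drop (m + 1)).dropLast.dropWhile (· == '-')).head? = none := by
    rw [List.head?_eq_none_iff, List.dropWhile_eq_nil_iff]
    exact fun x hx => (List.all_eq_true.mp hall) x hx
  have hBtrue : ((cs.drop (m + 1)).dropWhile (· == '-')).head? = some 'P' := by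
    rw [hstrip]; rfl
  rw [hLP, hAfalse, hBtrue]
  simp
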